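-- pv_equiv track=rewrite | github.com/olivia-clarkeedwards/hacker-rank-practice | getPrefixScores.py | getPrefixScores
-- ===== SOURCE A (Python) =====
-- def getPrefixScores(arr):
--     result = []
--     size_of_array = len(arr)
--
--     for end_of_prefix in range(1, size_of_array + 1):
--         prefix_array = arr[:end_of_prefix]
--
--         for index in range(len(prefix_array)):
--             prefix_array[index] += max(prefix_array)
--
--         result.append(sum(prefix_array) % (10**9 + 7))
--
--     return result
-- ===== SOURCE B (Python) =====
-- def getPrefixScores(arr):
--     MOD = 10**9 + 7
--     result = []
--     for k in range(1, len(arr) + 1):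
--         prefix = arr[:k]
--         # suffix maxima of the prefix, built right-to-left: suffixes[i] = max(prefix[i:])
--         built = []
--         running = None
--         for x in reversed(prefix):
--             running = x if running is None else max(running, x)
--             built.append(running)
--         suffixes = built[::-1]
--         # one forward pass: current max = max(best processed value, suffix max of the rest)
--         total = 0
--         processed = None
--         for x, s in zip(prefix, suffixes):
--             m = s if processed is None else max(processed, s)
--             v = x + m
--             processed = v if processed is None else max(processed, v)
--             total += v
--         result.append(total % MOD)
--     return result
-- ===== Notes on version B (the rewrite author's own statement) =====
-- stated objective: faster
-- what changed: Per prefix, B precomputes suffix maxima right-to-left and keeps a running max of already-mutated values in one forward pass, so A's O(k) max() rescan inside the mutation loop disappears.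
import Mathlib
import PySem

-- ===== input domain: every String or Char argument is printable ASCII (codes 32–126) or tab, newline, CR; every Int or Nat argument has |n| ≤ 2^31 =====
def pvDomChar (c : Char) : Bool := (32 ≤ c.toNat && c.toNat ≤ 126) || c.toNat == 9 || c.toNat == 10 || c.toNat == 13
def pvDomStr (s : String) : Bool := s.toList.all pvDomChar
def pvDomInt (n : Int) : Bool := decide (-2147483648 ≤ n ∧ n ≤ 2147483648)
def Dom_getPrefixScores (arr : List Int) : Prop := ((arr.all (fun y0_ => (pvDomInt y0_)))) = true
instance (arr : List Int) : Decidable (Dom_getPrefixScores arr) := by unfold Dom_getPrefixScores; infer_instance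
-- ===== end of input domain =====

-- B replaces A's max() rescan inside the per-prefix mutation loop by precomputed suffix
-- maxima plus a running max of the mutated values (objective: faster).

-- ===== PORT A =====
-- For each prefix arr[:e] (e = 1..len): add the CURRENT max of the (mutating) prefix to
-- each element in turn, then append sum % (10^9+7).
-- The `.getD 0` on max? is never the value used: the index loop only runs on a nonempty
-- list, where Python's max(...) succeeds and max? is `some`.
def getPrefixScores (arr : List Int) : List Int :=
  (PySem.List.pyRange 1 ((arr.length : Int) + 1) 1).foldl (fun result e =>
    let pa0 := PySem.List.slice arr none (some e)
    let pa := (PySem.List.pyRange 0 ((pa0.length : Int)) 1).foldl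
      (fun pa i =>
        PySem.List.pySetD pa i
          (PySem.List.pyGetD pa i 0 + ((PySem.List.max? pa (fun y => y)).getD 0)))
      pa0
    result ++ [PySem.Int.mod pa.sum (10 ^ 9 + 7)]) []

-- ===== PORT B =====
-- Per prefix: build the suffix-maxima list right-to-left, then one forward pass keeping
-- the running max `processed` of already-mutated values; current max = max(processed, suffixes[i]).
def getPrefixScores_alt (arr : List Int) : List Int :=
  (PySem.List.pyRange 1 ((arr.length : Int) + 1) 1).foldl (fun result k =>
    let pref := PySem.List.slice arr none (some k)
    let built := pref.reverse.foldl
      (fun (acc : List Int × Option Int) x =>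
        let r := match acc.2 with | none => x | some m => max m x
        (acc.1 ++ [r], some r)) ([], none)
    let suffixes := built.1.reverse
    let st := (pref.zip suffixes).foldl
      (fun (acc : Int × Option Int) q =>
        let m := match acc.2 with | none => q.2 | some p => max p q.2
        let v := q.1 + m
        (acc.1 + v, some (match acc.2 with | none => v | some p => max p v))) (0, none)
    result ++ [PySem.Int.mod st.1 (10 ^ 9 + 7)]) []

-- ===== PRECONDITION & SPEC =====
def Spec_getPrefixScores (arr : List Int) (out : List Int) : Prop := out = getPrefixScores_alt arr
instance (arr : List Int) (out : List Int) : Decidable (Spec_getPrefixScores arr out) := by unfold Spec_getPrefixScores; infer_instance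

-- ===== CLAIM (what is proved, stated in full; the proofs are below) =====
def Claim_equal_getPrefixScores : Prop := ∀ (arr : List Int), Dom_getPrefixScores arr → Spec_getPrefixScores arr (getPrefixScores arr)

-- ===== LEMMAS AND PROOFS =====

-- max of a list as an Option (none on []), and merging of optional maxima
def pvMaxD : List Int → Option Int
  | [] => none
  | a :: r => some (r.foldl max a)

def pvMerge : Option Int → Option Int → Option Int
  | none, q => q
  | some p, none => some p
  | some p, some q => some (max p q)

-- current max given processed-max p and suffix max s; updated processed-max
def pvM : Option Int → Int → Int
  | none, s => s
  | some q, s => max q s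

def pvUp : Option Int → Int → Option Int
  | none, v => some v
  | some q, v => some (max q v)

-- reference semantics of the mutation pass: p = max of already-mutated values
def pvMut : List Int → Option Int → List Int
  | [], _ => []
  | a :: r, p =>
    (a + pvM p (r.foldl max a)) :: pvMut r (pvUp p (a + pvM p (r.foldl max a)))

-- suffix maxima
def pvSfx : List Int → List Int
  | [] => []
  | a :: r => (r.foldl max a) :: pvSfx r

-- the two loop bodies of port B, as named functions (proved equal to the lambdas below)
def pvRStep (acc : List Int × Option Int) (x : Int) : List Int × Option Int :=
  (acc.1 ++ [pvM acc.2 x], some (pvM acc.2 x))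

def pvStep (acc : Int × Option Int) (q : Int × Int) : Int × Option Int :=
  (acc.1 + (q.1 + pvM acc.2 q.2), pvUp acc.2 (q.1 + pvM acc.2 q.2))

theorem pvRStep_eq :
    (fun (acc : List Int × Option Int) x =>
      let r := match acc.2 with | none => x | some m => max m x
      (acc.1 ++ [r], some r)) = pvRStep := by
  funext acc x
  obtain ⟨l, p⟩ := acc
  cases p <;> simp [pvRStep, pvM]

theorem pvStep_eq :
    (fun (acc : Int × Option Int) q =>
      let m := match acc.2 with | none => q.2 | some p => max p q.2
      let v := q.1 + m
      (acc.1 + v, some (match acc.2 with | none => v | some p => max p v))) = pvStep := by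
  funext acc q
  obtain ⟨t, p⟩ := acc
  cases p <;> simp [pvStep, pvM, pvUp]

theorem pvMerge_some (p : Option Int) (v : Int) : pvMerge p (some v) = pvUp p v := by
  cases p <;> rfl

theorem pvM_merge (p : Option Int) (s : Int) : (pvMerge p (some s)).getD 0 = pvM p s := by
  cases p <;> rfl

theorem pv_foldl_max (r : List Int) : ∀ a : Int, r.foldl max a = pvM (pvMaxD r) a := by
  induction r with
  | nil => intro a; rfl
  | cons b t ih =>
    intro a
    simp only [List.foldl_cons, pvMaxD]
    rw [ih (max a b), ih b]
    cases h : pvMaxD t with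
    | none => simp [pvM, max_comm]
    | some m => simp [pvM, max_comm, max_left_comm]

theorem pvMaxD_cons (a : Int) (r : List Int) :
    pvMaxD (a :: r) = pvMerge (some a) (pvMaxD r) := by
  cases r with
  | nil => rfl
  | cons b t =>
    show some (List.foldl max (max a b) t) = pvMerge (some a) (some (List.foldl max b t))
    rw [pv_foldl_max t (max a b), pv_foldl_max t b]
    cases pvMaxD t <;> simp [pvM, pvMerge, max_left_comm]

theorem pvMaxD_append (d r : List Int) :
    pvMaxD (d ++ r) = pvMerge (pvMaxD d) (pvMaxD r) := by
  induction d with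
  | nil => cases r <;> simp [pvMaxD, pvMerge]
  | cons a t ih =>
    rw [List.cons_append, pvMaxD_cons, ih, pvMaxD_cons]
    cases pvMaxD t <;> cases pvMaxD r <;> simp [pvMerge, max_assoc]

theorem pvMerge_assoc (p q s : Option Int) :
    pvMerge (pvMerge p q) s = pvMerge p (pvMerge q s) := by
  cases p <;> cases q <;> cases s <;> simp [pvMerge, max_assoc]

theorem pv_max?_eq (l : List Int) : PySem.List.max? l (fun y => y) = pvMaxD l := by
  cases l with
  | nil => simp [pvMaxD, PySem.List.max?_eq_none_iff]
  | cons a r => rw [PySem.List.max?_id_cons]; rfl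

theorem pv_set_append (d : List Int) (v a : Int) (r : List Int) :
    (d ++ a :: r).set d.length v = d ++ v :: r := by
  induction d with
  | nil => simp
  | cons b t ih => simp [ih]


-- A's inner index loop, with `done` already mutated, equals pvMut on the rest
theorem pv_loopA (rest : List Int) : ∀ done : List Int,
    (PySem.List.pyRange (done.length : Int) ((done.length : Int) + (rest.length : Int)) 1).foldl
      (fun pa i =>
        PySem.List.pySetD pa i
          (PySem.List.pyGetD pa i 0 + ((PySem.List.max? pa (fun y => y)).getD 0)))
      (done ++ rest)
    = done ++ pvMut rest (pvMaxD done) := by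
  induction rest with
  | nil =>
    intro done
    rw [PySem.List.pyRange_one_eq_nil (by simp)]
    simp [pvMut]
  | cons a r ih =>
    intro done
    rw [PySem.List.pyRange_one_cons (by push_cast [List.length_cons]; omega), List.foldl_cons]
    have hget : PySem.List.pyGetD (done ++ a :: r) ((done.length : Int)) 0 = a := by
      rw [PySem.List.pyGetD_of_nonneg _ _ (Int.natCast_nonneg _)]
      simp
    rw [hget, pv_max?_eq]
    set M : Int := ((pvMaxD (done ++ a :: r)).getD 0) with hM
    have hset : PySem.List.pySetD (done ++ a :: r) ((done.length : Int)) (a + M) = done ++ (a + M) :: r := by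
      rw [PySem.List.pySetD, PySem.List.pySet?_natCast _ _ _ (by simp)]
      simp [pv_set_append done (a + M) a r]
    rw [hset]
    have hacc : done ++ (a + M) :: r = (done ++ [a + M]) ++ r := by simp
    have hlo : ((done.length : Int) + 1) = (((done ++ [a + M]).length : Int)) := by
      push_cast [List.length_append, List.length_cons, List.length_nil]; omega
    have hhi : ((done.length : Int) + ((a :: r).length : Int))
        = (((done ++ [a + M]).length : Int) + (r.length : Int)) := by
      push_cast [List.length_append, List.length_cons, List.length_nil]; omega
    rw [hacc, hlo, hhi, ih (done ++ [a + M])]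
    have hMval : M = pvM (pvMaxD done) (r.foldl max a) := by
      rw [hM, pvMaxD_append]
      exact pvM_merge _ _
    have hP : pvMaxD (done ++ [a + M]) = pvUp (pvMaxD done) (a + M) := by
      rw [pvMaxD_append]
      exact pvMerge_some _ _
    rw [hP]
    simp only [pvMut, ← hMval, List.append_assoc, List.cons_append, List.nil_append]

-- B's backwards pass builds the reversed suffix-maxima list and the total max
theorem pv_revfold (l : List Int) :
    l.reverse.foldl pvRStep ([], none) = ((pvSfx l).reverse, pvMaxD l) := by
  induction l with
  | nil => simp [pvSfx, pvMaxD]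
  | cons a r ih =>
    simp only [List.reverse_cons, List.foldl_append, ih, List.foldl_cons, List.foldl_nil]
    rw [show pvRStep ((pvSfx r).reverse, pvMaxD r) a
        = ((pvSfx r).reverse ++ [pvM (pvMaxD r) a], some (pvM (pvMaxD r) a)) from rfl,
      ← pv_foldl_max r a]
    simp [pvSfx, pvMaxD]

-- B's forward pass computes the sum and merged max of pvMut
theorem pv_zipfold (l : List Int) : ∀ (p : Option Int) (t : Int),
    (l.zip (pvSfx l)).foldl pvStep (t, p)
    = (t + (pvMut l p).sum, pvMerge p (pvMaxD (pvMut l p))) := by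
  induction l with
  | nil =>
    intro p t
    cases p <;> simp [pvMut, pvMaxD, pvMerge]
  | cons a r ih =>
    intro p t
    simp only [pvSfx, List.zip_cons_cons, List.foldl_cons]
    rw [show pvStep (t, p) (a, r.foldl max a)
        = (t + (a + pvM p (r.foldl max a)), pvUp p (a + pvM p (r.foldl max a))) from rfl,
      ih]
    simp only [pvMut, List.sum_cons, pvMaxD_cons, ← pvMerge_assoc, pvMerge_some,
      Prod.mk.injEq]
    exact ⟨by ring, trivial⟩

-- per-prefix equality of the two inner computations
theorem pv_inner (l : List Int) :
    (PySem.List.pyRange 0 ((l.length : Int)) 1).foldl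
      (fun pa i =>
        PySem.List.pySetD pa i
          (PySem.List.pyGetD pa i 0 + ((PySem.List.max? pa (fun y => y)).getD 0)))
      l
    = pvMut l none := by
  have h := pv_loopA l []
  simpa [pvMaxD] using h

theorem pv_body (result : List Int) (l : List Int) :
    (result ++ [PySem.Int.mod
      ((PySem.List.pyRange 0 ((l.length : Int)) 1).foldl
        (fun pa i =>
          PySem.List.pySetD pa i
            (PySem.List.pyGetD pa i 0 + ((PySem.List.max? pa (fun y => y)).getD 0)))
        l).sum (10 ^ 9 + 7)])
    = (result ++ [PySem.Int.mod
        ((l.zip ((l.reverse.foldl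
          (fun (acc : List Int × Option Int) x =>
            let r := match acc.2 with | none => x | some m => max m x
            (acc.1 ++ [r], some r)) ([], none)).1.reverse)).foldl
          (fun (acc : Int × Option Int) q =>
            let m := match acc.2 with | none => q.2 | some p => max p q.2
            let v := q.1 + m
            (acc.1 + v, some (match acc.2 with | none => v | some p => max p v))) (0, none)).1
        (10 ^ 9 + 7)]) := by
  rw [pv_inner, pvRStep_eq, pv_revfold]
  simp only [List.reverse_reverse]
  rw [pvStep_eq, pv_zipfold]
  simp

-- ===== VERDICT (by name: the statement is the Claim_ definition above) =====
theorem getPrefixScores_spec : Claim_equal_getPrefixScores := by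
  intro arr _
  unfold Spec_getPrefixScores getPrefixScores getPrefixScores_alt
  apply PySem.List.foldl_congr_mem
  intro acc x _
  exact pv_body acc (PySem.List.slice arr none (some x))
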